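-- pv_equiv track=rewrite | github.com/Hirin/discord-bot | src/cogs/lecture/video_views.py | _condense_summaries
-- ===== SOURCE A (Python) =====
-- def _condense_summaries(summaries: list[str], max_chars: int = 2000) -> str:
--     """Condense summaries for context in next part"""
--     lines = []
--     for summary in summaries:
--         for line in summary.split('\n'):
--             if line.startswith('## ') or line.startswith('- **'):
--                 lines.append(line)
--                 if len('\n'.join(lines)) > max_chars:
--                     return '\n'.join(lines)
--     return '\n'.join(lines)
-- ===== SOURCE B (Python) =====
-- def _condense_summaries(summaries: list[str], max_chars: int = 2000) -> str:
--     """Condense summaries for context in next part"""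
--     picked = [line
--               for summary in summaries
--               for line in summary.split('\n')
--               if line.startswith('## ') or line.startswith('- **')]
--     total = 0
--     for i, line in enumerate(picked):
--         total += len(line) + (1 if i else 0)
--         if total > max_chars:
--             return '\n'.join(picked[:i + 1])
--     return '\n'.join(picked)
-- ===== Notes on version B (the rewrite author's own statement) =====
-- stated objective: alternative
-- what changed: Two separate passes (flatten-and-filter all matching lines into one list, then a running-total scan that truncates by index) replace the interleaved nested loop that re-joins the whole accumulator after every append.
import Mathlib
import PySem

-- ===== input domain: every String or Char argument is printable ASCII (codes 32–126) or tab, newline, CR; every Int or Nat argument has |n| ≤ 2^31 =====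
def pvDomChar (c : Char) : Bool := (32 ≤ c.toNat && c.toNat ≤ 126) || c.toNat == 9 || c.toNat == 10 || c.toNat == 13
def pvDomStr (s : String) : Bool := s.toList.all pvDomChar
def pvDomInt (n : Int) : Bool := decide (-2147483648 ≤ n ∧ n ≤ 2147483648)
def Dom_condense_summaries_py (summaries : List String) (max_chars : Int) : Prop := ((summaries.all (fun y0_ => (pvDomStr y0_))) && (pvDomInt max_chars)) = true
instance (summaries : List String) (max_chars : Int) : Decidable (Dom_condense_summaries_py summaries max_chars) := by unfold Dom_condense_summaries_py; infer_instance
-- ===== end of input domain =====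

-- B replaces A's interleaved nested loop (which re-joins the whole accumulator after
-- every append) by two passes: flatten-and-filter, then a running-total scan by index;
-- an alternative decomposition with the same return value everywhere.

-- shared exact port of s.split('\n') (sep ≠ "")
def pySplitNL (s : String) : List String :=
  (PySem.Chars.splitOn s.toList ['\n']).map String.ofList

-- ===== PORT A =====
-- inner 'for line in summary.split('\n')' loop; Sum.inl = early return, Sum.inr = go on
def pvAInner (max_chars : Int) (acc : List String) : List String → List String ⊕ List String
  | [] => Sum.inr acc
  | line :: rest =>
    if PySem.Str.startswith line "## " || PySem.Str.startswith line "- **" then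
      let acc' := acc ++ [line]
      if max_chars < PySem.Str.len (PySem.Str.join "\n" acc') then Sum.inl acc'
      else pvAInner max_chars acc' rest
    else pvAInner max_chars acc rest

-- outer 'for summary in summaries' loop
def pvAOuter (max_chars : Int) (acc : List String) : List String → List String ⊕ List String
  | [] => Sum.inr acc
  | s :: rest =>
    match pvAInner max_chars acc (pySplitNL s) with
    | Sum.inl r => Sum.inl r
    | Sum.inr acc' => pvAOuter max_chars acc' rest

def condense_summaries_py (summaries : List String) (max_chars : Int) : String :=
  match pvAOuter max_chars [] summaries with
  | Sum.inl r => PySem.Str.join "\n" r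
  | Sum.inr r => PySem.Str.join "\n" r

-- ===== PORT B =====
-- first pass: the flattening comprehension
def pvBPicked (summaries : List String) : List String :=
  summaries.flatMap (fun summary =>
    (pySplitNL summary).filter (fun line =>
      PySem.Str.startswith line "## " || PySem.Str.startswith line "- **"))

-- second pass: running-total scan, returns the index of the first overflowing line
def pvBScan (max_chars : Int) : Nat → Int → List String → Option Nat
  | _, _, [] => none
  | i, total, line :: rest =>
    if max_chars < total + PySem.Str.len line + (if i = 0 then 0 else 1) then some i
    else pvBScan max_chars (i + 1) (total + PySem.Str.len line + (if i = 0 then 0 else 1)) rest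

def condense_summaries_py_alt (summaries : List String) (max_chars : Int) : String :=
  let picked := pvBPicked summaries
  match pvBScan max_chars 0 0 picked with
  | some i => PySem.Str.join "\n" (picked.take (i + 1))
  | none => PySem.Str.join "\n" picked

-- ===== PRECONDITION & SPEC =====
def Spec_condense_summaries_py (summaries : List String) (max_chars : Int) (out : String) : Prop := out = condense_summaries_py_alt summaries max_chars
instance (summaries : List String) (max_chars : Int) (out : String) : Decidable (Spec_condense_summaries_py summaries max_chars out) := by unfold Spec_condense_summaries_py; infer_instance

-- ===== CLAIM (what is proved, stated in full; the proofs are below) =====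
def Claim_equal_condense_summaries_py : Prop := ∀ (summaries : List String) (max_chars : Int), Dom_condense_summaries_py summaries max_chars → Spec_condense_summaries_py summaries max_chars (condense_summaries_py summaries max_chars)

-- ===== LEMMAS AND PROOFS =====

-- common reference computation both ports reduce to
def pvChop (mc : Int) : List String → List String → List String
  | done, [] => done
  | done, x :: rest =>
    if mc < PySem.Str.len (PySem.Str.join "\n" (done ++ [x])) then done ++ [x]
    else pvChop mc (done ++ [x]) rest

theorem pvAInner_append (mc : Int) (acc l1 l2 : List String) :
    pvAInner mc acc (l1 ++ l2) =
      (match pvAInner mc acc l1 with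
       | Sum.inl r => Sum.inl r
       | Sum.inr a => pvAInner mc a l2) := by
  induction l1 generalizing acc with
  | nil => simp [pvAInner]
  | cons x l1 ih =>
    simp only [List.cons_append, pvAInner]
    split_ifs <;> simp [ih]

theorem pvAOuter_eq (mc : Int) (acc : List String) (ss : List String) :
    pvAOuter mc acc ss = pvAInner mc acc (ss.flatMap pySplitNL) := by
  induction ss generalizing acc with
  | nil => simp [pvAOuter, pvAInner]
  | cons s ss ih =>
    simp only [pvAOuter, List.flatMap_cons, pvAInner_append]
    cases pvAInner mc acc (pySplitNL s) <;> simp [ih]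

theorem pvAInner_chop (mc : Int) (acc lines : List String) :
    (match pvAInner mc acc lines with
     | Sum.inl r => r
     | Sum.inr r => r) =
    pvChop mc acc (lines.filter (fun line =>
      PySem.Str.startswith line "## " || PySem.Str.startswith line "- **")) := by
  induction lines generalizing acc with
  | nil => simp [pvAInner, pvChop]
  | cons x l ih =>
    simp only [pvAInner, List.filter_cons]
    by_cases h1 : (PySem.Str.startswith x "## " || PySem.Str.startswith x "- **") = true
    · rw [if_pos h1, if_pos h1]
      simp only [pvChop]
      by_cases h2 : mc < PySem.Str.len (PySem.Str.join "\n" (acc ++ [x]))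
      · rw [if_pos h2, if_pos h2]
      · rw [if_neg h2, if_neg h2]
        exact ih (acc ++ [x])
    · rw [if_neg h1, if_neg h1]
      exact ih acc

theorem pvCharsJoinLen_snoc (d : List (List Char)) (x : List Char) :
    (PySem.Chars.join ['\n'] (d ++ [x])).length =
      (PySem.Chars.join ['\n'] d).length + x.length + (if d = [] then 0 else 1) := by
  induction d with
  | nil => simp [PySem.Chars.join_nil, PySem.Chars.join_singleton]
  | cons a d ih =>
    cases d with
    | nil =>
      simp [PySem.Chars.join_singleton, PySem.Chars.join_cons_cons]
      omega
    | cons b d' =>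
      rw [List.cons_append, List.cons_append, PySem.Chars.join_cons_cons,
        PySem.Chars.join_cons_cons]
      rw [List.cons_append] at ih
      have hne : ¬(b :: d' = ([] : List (List Char))) := by simp
      rw [if_neg hne] at ih
      have hne2 : ¬(a :: b :: d' = ([] : List (List Char))) := by simp
      rw [if_neg hne2]
      simp only [List.length_append]
      omega

theorem pvStrLen_toList (s : String) : PySem.Str.len s = (s.toList.length : Int) := by
  simp [PySem.Str.len]

theorem pvJoinLen_snoc (d : List String) (x : String) :
    PySem.Str.len (PySem.Str.join "\n" (d ++ [x])) =
      PySem.Str.len (PySem.Str.join "\n" d) + PySem.Str.len x +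
        (if d = [] then 0 else 1) := by
  have hsep : ("\n" : String).toList = ['\n'] := by decide
  rw [pvStrLen_toList, pvStrLen_toList, pvStrLen_toList,
    PySem.Str.toList_join, PySem.Str.toList_join, hsep, List.map_append, List.map_cons,
    List.map_nil, pvCharsJoinLen_snoc]
  have hmap : (d.map String.toList = []) ↔ d = [] := by simp
  by_cases hd : d = [] <;> simp [hd, hmap]

theorem pvBScan_chop (mc : Int) (rest done : List String) :
    (match pvBScan mc done.length (PySem.Str.len (PySem.Str.join "\n" done)) rest with
     | some i => PySem.Str.join "\n" ((done ++ rest).take (i + 1))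
     | none => PySem.Str.join "\n" (done ++ rest)) =
    PySem.Str.join "\n" (pvChop mc done rest) := by
  induction rest generalizing done with
  | nil => simp [pvBScan, pvChop]
  | cons x rest ih =>
    have htot : PySem.Str.len (PySem.Str.join "\n" done) + PySem.Str.len x +
        (if done.length = 0 then 0 else 1) =
        PySem.Str.len (PySem.Str.join "\n" (done ++ [x])) := by
      rw [pvJoinLen_snoc]
      by_cases h : done = [] <;> simp [h]
    simp only [pvBScan, pvChop, htot]
    by_cases h : mc < PySem.Str.len (PySem.Str.join "\n" (done ++ [x]))
    · rw [if_pos h, if_pos h]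
      have htake : (done ++ x :: rest).take (done.length + 1) = done ++ [x] := by
        rw [List.take_append]
        simp
      simp [htake]
    · rw [if_neg h, if_neg h]
      have := ih (done ++ [x])
      simpa using this

theorem condense_summaries_py_spec : Claim_equal_condense_summaries_py := by
  intro summaries max_chars _
  unfold Spec_condense_summaries_py
  unfold condense_summaries_py condense_summaries_py_alt
  have hA : (match pvAOuter max_chars [] summaries with
             | Sum.inl r => PySem.Str.join "\n" r
             | Sum.inr r => PySem.Str.join "\n" r) =
      PySem.Str.join "\n" (pvChop max_chars [] (pvBPicked summaries)) := by
    rw [pvAOuter_eq]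
    have h := pvAInner_chop max_chars [] (summaries.flatMap pySplitNL)
    have hp : (summaries.flatMap pySplitNL).filter (fun line =>
        PySem.Str.startswith line "## " || PySem.Str.startswith line "- **") =
        pvBPicked summaries := by
      simp [pvBPicked, List.filter_flatMap]
    rw [hp] at h
    cases hcase : pvAInner max_chars [] (summaries.flatMap pySplitNL) with
    | inl r =>
      rw [hcase] at h; simp at h; simp [h]
    | inr r =>
      rw [hcase] at h; simp at h; simp [h]
  have hB := pvBScan_chop max_chars (pvBPicked summaries) []
  simp only [List.length_nil, List.nil_append] at hB
  have h0 : PySem.Str.len (PySem.Str.join "\n" ([] : List String)) = 0 := by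
    simp [PySem.Str.len, PySem.Str.join, PySem.Chars.join_nil]
  rw [h0] at hB
  rw [hA, ← hB]
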